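-- pv_equiv track=rewrite | github.com/VINAYKUMAR-69/cryptography-and-network-security-for-edge-computing-CSA5109 | exp40/Letter Frequency Attack.py | frequency_attack
-- ===== SOURCE A (Python) =====
-- from collections import Counter
--
-- english_freq_order = "ETAOINSHRDLCUMWFGYPBVKJXQZ"
--
-- def clean_text(text):
--     return ''.join(filter(str.isalpha, text.upper()))
--
-- def build_mapping(cipher_freq_order, offset=0):
--     return dict(zip(cipher_freq_order, english_freq_order[offset:] + english_freq_order[:offset]))
--
-- def decrypt(ciphertext, mapping):
--     return ''.join(mapping.get(c, c) for c in ciphertext)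
--
-- def frequency_attack(ciphertext, top_n=10):
--     ciphertext = clean_text(ciphertext)
--     freq = Counter(ciphertext)
--     cipher_freq_order = [pair[0] for pair in freq.most_common()]
--
--     results = []
--     for offset in range(top_n):
--         mapping = build_mapping(cipher_freq_order, offset)
--         plaintext = decrypt(ciphertext, mapping)
--         results.append((offset + 1, plaintext))
--
--     return results
-- ===== SOURCE B (Python) =====
-- from collections import Counter
--
-- english_freq_order = "ETAOINSHRDLCUMWFGYPBVKJXQZ"
--
-- def frequency_attack(ciphertext, top_n=10):
--     cleaned = [c for c in ciphertext.upper() if c.isalpha()]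
--     order = [c for c, _ in Counter(cleaned).most_common()]
--     # inverted index: each distinct letter -> the list of its positions in cleaned
--     positions = {}
--     for i, c in enumerate(cleaned):
--         positions.setdefault(c, []).append(i)
--     results = []
--     for offset in range(top_n):
--         rot = english_freq_order[offset:] + english_freq_order[:offset]
--         out = [''] * len(cleaned)
--         for rank, c in enumerate(order):
--             ch = rot[rank]
--             for i in positions[c]:
--                 out[i] = ch
--         results.append((offset + 1, ''.join(out)))
--     return results
-- ===== Notes on version B (the rewrite author's own statement) =====
-- stated objective: alternative
-- what changed: B inverts the decryption loop: it builds an inverted index from each distinct letter to the list of its positions once, and for each offset scatter-fills an output buffer letter-group by letter-group (one rotated-alphabet lookup per distinct letter), instead of A's gather that rebuilds a zip mapping dict and resolves every ciphertext character through dict.get for each offset.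
import Mathlib
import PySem

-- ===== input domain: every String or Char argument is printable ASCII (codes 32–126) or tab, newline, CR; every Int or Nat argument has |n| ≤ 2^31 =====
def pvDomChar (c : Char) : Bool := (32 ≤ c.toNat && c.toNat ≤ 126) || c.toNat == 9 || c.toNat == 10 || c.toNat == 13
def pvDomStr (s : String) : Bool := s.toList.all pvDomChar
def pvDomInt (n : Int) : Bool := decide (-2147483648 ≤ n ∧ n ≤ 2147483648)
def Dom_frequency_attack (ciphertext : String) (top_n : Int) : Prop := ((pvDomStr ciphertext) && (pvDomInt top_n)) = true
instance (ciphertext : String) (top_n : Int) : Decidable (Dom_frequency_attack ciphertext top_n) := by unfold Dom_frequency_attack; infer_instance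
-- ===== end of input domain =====

-- B inverts A's per-offset gather (a zip mapping dict resolved per character) into a scatter:
-- an inverted index letter -> positions built once, and per offset an output buffer filled group
-- by group; the equality of the return values is proved for all inputs.

-- english_freq_order = "ETAOINSHRDLCUMWFGYPBVKJXQZ"
def pvEng : List Char := "ETAOINSHRDLCUMWFGYPBVKJXQZ".toList

-- english_freq_order[offset:] + english_freq_order[:offset]  (computed by both Pythons)
def pvRotate (offset : Int) : List Char :=
  PySem.List.slice pvEng (some offset) none ++ PySem.List.slice pvEng none (some offset)

-- ===== PORT A =====
-- clean_text: ''.join(filter(str.isalpha, text.upper()))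
def pvCleanText (text : String) : List Char :=
  List.filter PySem.Chars.isalpha (PySem.Chars.upper text.toList)

-- build_mapping: dict(zip(cipher_freq_order, english_freq_order[offset:] + english_freq_order[:offset]))
def pvBuildMapping (cipherFreqOrder : List Char) (offset : Int) : PySem.Dict Char Char :=
  PySem.Dict.ofList (cipherFreqOrder.zip (pvRotate offset))

-- decrypt: ''.join(mapping.get(c, c) for c in ciphertext)
def pvDecrypt (cs : List Char) (mapping : PySem.Dict Char Char) : List Char :=
  cs.map (fun c => mapping.getD c c)

def frequency_attack (ciphertext : String) (top_n : Int) : List (Int × String) :=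
  let cs := pvCleanText ciphertext
  let freq := PySem.Dict.counter cs
  -- freq.most_common(): items sorted by count descending (stable); take the letters
  let cipherFreqOrder := (PySem.List.sorted freq.items (fun p => p.2) true).map Prod.fst
  (PySem.List.pyRange 0 top_n).foldl
    (fun results offset =>
      results ++ [((offset + 1 : Int),
        String.ofList (pvDecrypt cs (pvBuildMapping cipherFreqOrder offset)))]) []

-- ===== PORT B =====
def frequency_attack_alt (ciphertext : String) (top_n : Int) : List (Int × String) :=
  let cleaned := List.filter PySem.Chars.isalpha (PySem.Chars.upper ciphertext.toList)
  let order := (PySem.List.sorted (PySem.Dict.counter cleaned).items (fun p => p.2) true).map Prod.fst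
  -- positions = {}; for i, c in enumerate(cleaned): positions.setdefault(c, []).append(i)
  let positions := (PySem.List.enumerate cleaned).foldl
      (fun d p => d.insert p.2 (d.getD p.2 [] ++ [p.1])) PySem.Dict.empty
  (PySem.List.pyRange 0 top_n).foldl
    (fun results offset =>
      let rot := pvRotate offset
      -- out = [''] * len(cleaned); cells are '' or a single char: List Char, [] or [ch]
      let out := (PySem.List.enumerate order).foldl
          (fun out p =>
            let ch := PySem.List.pyGetD rot p.1 'A'
            (positions.getD p.2 []).foldl
              (fun out i => PySem.List.pySetD out i ([ch] : List Char)) out)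
          (List.replicate cleaned.length ([] : List Char))
      results ++ [((offset + 1 : Int), String.ofList (PySem.Chars.join [] out))]) []

-- ===== PRECONDITION & SPEC =====
def Spec_frequency_attack (ciphertext : String) (top_n : Int) (out : List (Int × String)) : Prop := out = frequency_attack_alt ciphertext top_n
instance (ciphertext : String) (top_n : Int) (out : List (Int × String)) : Decidable (Spec_frequency_attack ciphertext top_n out) := by unfold Spec_frequency_attack; infer_instance

-- ===== CLAIM (what is proved, stated in full; the proofs are below) =====
def Claim_equal_frequency_attack : Prop := ∀ (ciphertext : String) (top_n : Int), Dom_frequency_attack ciphertext top_n → Spec_frequency_attack ciphertext top_n (frequency_attack ciphertext top_n)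

-- ===== LEMMAS AND PROOFS =====

lemma pv_foldl_snoc {α : Type} (f : Int → α) (l : List Int) (acc : List α) :
    l.foldl (fun a o => a ++ [f o]) acc = acc ++ l.map f := by
  induction l generalizing acc with
  | nil => simp
  | cons x t ih => simp [List.foldl_cons, ih]

lemma pv_mem_eng_of_bounds (n : Nat) (h1 : 65 ≤ n) (h2 : n ≤ 90) : Char.ofNat n ∈ pvEng := by
  interval_cases n <;> decide

lemma pv_char_le_iff (a b : Char) : a ≤ b ↔ a.toNat ≤ b.toNat := by
  rw [Char.le_def]
  exact UInt32.le_iff_toNat_le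

lemma pv_upperChar_mem_eng (c : Char)
    (h : PySem.Chars.isalpha (PySem.Chars.upperChar c) = true) :
    PySem.Chars.upperChar c ∈ pvEng := by
  have hb : 65 ≤ (PySem.Chars.upperChar c).toNat ∧ (PySem.Chars.upperChar c).toNat ≤ 90 := by
    by_cases hl : PySem.Chars.islower c = true
    · have hc : 97 ≤ c.toNat ∧ c.toNat ≤ 122 := by
        unfold PySem.Chars.islower at hl
        simp only [Bool.and_eq_true, decide_eq_true_eq, pv_char_le_iff] at hl
        exact ⟨hl.1, hl.2⟩
      have hu : PySem.Chars.upperChar c = Char.ofNat (c.toNat - 32) := by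
        simp [PySem.Chars.upperChar, hl]
      have hv : Nat.isValidChar (c.toNat - 32) := by
        left; omega
      rw [hu, Char.toNat_ofNat, if_pos hv]
      omega
    · have hu : PySem.Chars.upperChar c = c := by
        simp [PySem.Chars.upperChar, hl]
      rw [hu] at h ⊢
      unfold PySem.Chars.isalpha at h
      rw [Bool.or_eq_true] at h
      rcases h with h | h
      · unfold PySem.Chars.isupper at h
        simp only [Bool.and_eq_true, decide_eq_true_eq, pv_char_le_iff] at h
        exact ⟨h.1, h.2⟩
      · exact absurd h hl
  have := pv_mem_eng_of_bounds _ hb.1 hb.2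
  rwa [Char.ofNat_toNat] at this

lemma pv_mem_clean_mem_eng {text : String} {c : Char} (h : c ∈ pvCleanText text) : c ∈ pvEng := by
  unfold pvCleanText at h
  rw [List.mem_filter] at h
  obtain ⟨hm, ha⟩ := h
  unfold PySem.Chars.upper at hm
  rw [List.mem_map] at hm
  obtain ⟨x, _, rfl⟩ := hm
  exact pv_upperChar_mem_eng x ha

-- the letters of most_common, in order
def pvOrderOf (cs : List Char) : List Char :=
  (PySem.List.sorted (PySem.Dict.counter cs).items (fun p => p.2) true).map Prod.fst

lemma pv_order_perm_keys (cs : List Char) : (pvOrderOf cs).Perm (PySem.Dict.counter cs).keys := by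
  have h := (PySem.List.sorted_perm (PySem.Dict.counter cs).items (fun p => p.2) true).map Prod.fst
  simpa [pvOrderOf, PySem.Dict.keys] using h

lemma pv_order_nodup (cs : List Char) : (pvOrderOf cs).Nodup :=
  ((pv_order_perm_keys cs).nodup_iff).mpr (PySem.Dict.nodup_keys_counter cs)

lemma pv_mem_order {cs : List Char} {c : Char} : c ∈ pvOrderOf cs ↔ c ∈ cs := by
  rw [(pv_order_perm_keys cs).mem_iff, PySem.Dict.keys_counter, PySem.Set.mem_ofList]

lemma pv_order_len {cs : List Char} (h : ∀ c ∈ cs, c ∈ pvEng) : (pvOrderOf cs).length ≤ 26 := by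
  have hsub : pvOrderOf cs ⊆ pvEng := fun c hc => h c (pv_mem_order.mp hc)
  have hle := (List.subperm_of_subset (pv_order_nodup cs) hsub).length_le
  simpa using hle

lemma pv_rot_len {o : Int} (h : 0 ≤ o) : (pvRotate o).length = 26 := by
  have h26 : pvEng.length = 26 := rfl
  rw [pvRotate, PySem.List.slice_from pvEng h, PySem.List.slice_to pvEng h]
  rw [List.length_append, List.length_drop, List.length_take, h26]
  omega

-- A's dict lookup at the r-th most-common letter is the r-th rotated letter
lemma pv_mapping_getD {cs : List Char} {r : Nat} {o : Int}
    (hcs : ∀ x ∈ cs, x ∈ pvEng) (hr : r < (pvOrderOf cs).length) (ho : 0 ≤ o) :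
    (pvBuildMapping (pvOrderOf cs) o).getD ((pvOrderOf cs)[r]) ((pvOrderOf cs)[r])
      = (pvRotate o)[r]'(by have := pv_order_len hcs; rw [pv_rot_len ho]; omega) := by
  have hL : (pvOrderOf cs).length ≤ 26 := pv_order_len hcs
  have hrot : (pvRotate o).length = 26 := pv_rot_len ho
  have hM : (pvBuildMapping (pvOrderOf cs) o).items = (pvOrderOf cs).zip (pvRotate o) := by
    have := PySem.Dict.items_foldl_insert_fresh ((pvOrderOf cs).zip (pvRotate o))
      Prod.fst Prod.snd PySem.Dict.empty
      (by intro a _; exact PySem.Dict.contains_empty _)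
      (by rw [List.map_fst_zip (by omega)]; exact pv_order_nodup cs)
    simpa [pvBuildMapping, PySem.Dict.ofList, PySem.Dict.update] using this
  have hzi : r < ((pvOrderOf cs).zip (pvRotate o)).length := by
    rw [List.length_zip]; omega
  have hmemM : ((pvOrderOf cs)[r], (pvRotate o)[r]'(by omega)) ∈ (pvBuildMapping (pvOrderOf cs) o).items := by
    rw [hM]
    refine List.mem_iff_getElem.mpr ⟨r, hzi, ?_⟩
    rw [List.getElem_zip]
  exact PySem.Dict.getD_of_mem_items _ hmemM (PySem.Dict.nodup_keys_ofList _) _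

-- B's positions dict: positions.getD c [] lists exactly the indices of c, in order
lemma pv_positions_foldl (l : List (Int × Char)) (d : PySem.Dict Char (List Int)) (c : Char) :
    (l.foldl (fun d p => d.insert p.2 (d.getD p.2 [] ++ [p.1])) d).getD c []
      = d.getD c [] ++ (l.filter (fun p => p.2 == c)).map Prod.fst := by
  induction l generalizing d with
  | nil => simp
  | cons q t ih =>
    rw [List.foldl_cons, ih]
    by_cases h : q.2 = c
    · subst h
      simp [PySem.Dict.getD, PySem.Dict.get?_insert_self]
    · have hb : (q.2 == c) = false := by simp [h]
      simp only [List.filter_cons, hb, Bool.false_eq_true, if_false, PySem.Dict.getD]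
      rw [PySem.Dict.get?_insert_of_ne _ _ (Ne.symm h)]

lemma pv_positions_getD (cs : List Char) (c : Char) :
    ((PySem.List.enumerate cs).foldl
        (fun d p => d.insert p.2 (d.getD p.2 [] ++ [p.1])) PySem.Dict.empty).getD c []
      = ((PySem.List.enumerate cs).filter (fun p => p.2 == c)).map Prod.fst := by
  rw [pv_positions_foldl]
  simp [PySem.Dict.getD, PySem.Dict.get?_empty]

lemma pv_mem_positions {cs : List Char} {c : Char} {j : Nat} (hj : j < cs.length) :
    ((j : Int) ∈ ((PySem.List.enumerate cs).filter (fun p => p.2 == c)).map Prod.fst)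
      ↔ cs[j] = c := by
  simp only [List.mem_map, List.mem_filter, beq_iff_eq]
  constructor
  · rintro ⟨p, ⟨hpm, hpc⟩, hpf⟩
    obtain ⟨k, hk, rfl⟩ := (PySem.List.mem_enumerate_iff _ _ _).mp hpm
    simp only [zero_add] at hpf hpc
    have : k = j := by exact_mod_cast hpf
    subst this; exact hpc
  · intro h
    refine ⟨((j : Int), cs[j]), ⟨?_, by simpa using h⟩, rfl⟩
    exact (PySem.List.mem_enumerate_iff _ _ _).mpr ⟨j, hj, by simp⟩

lemma pv_positions_nonneg {cs : List Char} {c : Char} {i : Int}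
    (h : i ∈ ((PySem.List.enumerate cs).filter (fun p => p.2 == c)).map Prod.fst) : 0 ≤ i := by
  simp only [List.mem_map, List.mem_filter] at h
  obtain ⟨p, ⟨hpm, _⟩, rfl⟩ := h
  obtain ⟨k, _, rfl⟩ := (PySem.List.mem_enumerate_iff _ _ _).mp hpm
  simp

-- inner fill: setting the same value at a list of nonnegative indices
lemma pv_fill_length (is : List Int) (v : List Char) (out : List (List Char)) :
    (is.foldl (fun o i => PySem.List.pySetD o i v) out).length = out.length := by
  induction is generalizing out with
  | nil => rfl
  | cons i t ih => rw [List.foldl_cons, ih, PySem.List.length_pySetD]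

lemma pv_fill_getElem (is : List Int) (v : List Char) (out : List (List Char))
    (hnn : ∀ i ∈ is, 0 ≤ i) (j : Nat) (hj : j < out.length) :
    (is.foldl (fun o i => PySem.List.pySetD o i v) out)[j]?
      = if (j : Int) ∈ is then some v else out[j]? := by
  induction is generalizing out with
  | nil => simp
  | cons i t ih =>
    rw [List.foldl_cons, ih _ (fun x hx => hnn x (List.mem_cons_of_mem _ hx))
      (by rw [PySem.List.length_pySetD]; exact hj)]
    have hi0 : 0 ≤ i := hnn i (List.mem_cons_self)
    rw [PySem.List.pySetD_of_nonneg _ _ hi0]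
    by_cases hti : (j : Int) ∈ t
    · simp [hti, List.mem_cons]
    · by_cases hij : i = (j : Int)
      · subst hij
        simp [hti, List.mem_cons, by exact_mod_cast hj]
      · have hne : i.toNat ≠ j := by omega
        simp [hti, List.mem_cons, Ne.symm hij, List.getElem?_set_ne hne]

-- ===== the scatter result, cell by cell =====

lemma pv_scatter_length (cs : List Char) (rot : List Char) (ps : List (Int × Char))
    (out : List (List Char)) :
    (ps.foldl (fun out p =>
        (((PySem.List.enumerate cs).foldl
            (fun d q => d.insert q.2 (d.getD q.2 [] ++ [q.1])) PySem.Dict.empty).getD p.2 []).foldl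
          (fun out i => PySem.List.pySetD out i ([PySem.List.pyGetD rot p.1 'A'] : List Char)) out) out).length
      = out.length := by
  induction ps generalizing out with
  | nil => rfl
  | cons p t ih => rw [List.foldl_cons, ih, pv_fill_length]

-- after processing pairs whose letters all differ from cleaned[j], cell j is untouched
lemma pv_scatter_miss (cs : List Char) (rot : List Char) (ps : List (Int × Char))
    (out : List (List Char)) (j : Nat) (hj : j < cs.length) (hlen : out.length = cs.length)
    (hmiss : ∀ p ∈ ps, p.2 ≠ cs[j]) :
    (ps.foldl (fun out p =>
        (((PySem.List.enumerate cs).foldl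
            (fun d q => d.insert q.2 (d.getD q.2 [] ++ [q.1])) PySem.Dict.empty).getD p.2 []).foldl
          (fun out i => PySem.List.pySetD out i ([PySem.List.pyGetD rot p.1 'A'] : List Char)) out) out)[j]?
      = out[j]? := by
  induction ps generalizing out with
  | nil => simp
  | cons p t ih =>
    rw [List.foldl_cons, ih _ (by rw [pv_fill_length]; exact hlen)
      (fun q hq => hmiss q (List.mem_cons_of_mem _ hq))]
    rw [pv_positions_getD, pv_fill_getElem _ _ _ (fun i hi => pv_positions_nonneg hi) j (by omega)]
    have : ¬ ((j : Int) ∈ ((PySem.List.enumerate cs).filter (fun q => q.2 == p.2)).map Prod.fst) := by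
      rw [pv_mem_positions hj]
      exact fun h => hmiss p List.mem_cons_self h.symm
    simp [this]

-- if some pair (r, cleaned[j]) is among ps and letters of ps are distinct, cell j ends as that value
lemma pv_scatter_hit (cs : List Char) (rot : List Char) (ps : List (Int × Char))
    (out : List (List Char)) (j : Nat) (hj : j < cs.length) (hlen : out.length = cs.length)
    (hnd : (ps.map Prod.snd).Nodup) (r : Int) (hmem : (r, cs[j]) ∈ ps) :
    (ps.foldl (fun out p =>
        (((PySem.List.enumerate cs).foldl
            (fun d q => d.insert q.2 (d.getD q.2 [] ++ [q.1])) PySem.Dict.empty).getD p.2 []).foldl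
          (fun out i => PySem.List.pySetD out i ([PySem.List.pyGetD rot p.1 'A'] : List Char)) out) out)[j]?
      = some ([PySem.List.pyGetD rot r 'A'] : List Char) := by
  induction ps generalizing out with
  | nil => exact absurd hmem (List.not_mem_nil)
  | cons p t ih =>
    rw [List.foldl_cons]
    rw [List.map_cons, List.nodup_cons] at hnd
    rcases List.mem_cons.mp hmem with heq | hmemt
    · subst heq
      rw [pv_scatter_miss cs rot t _ j hj (by rw [pv_fill_length]; exact hlen)
        (by intro q hq hq2; exact hnd.1 (List.mem_map.mpr ⟨q, hq, hq2⟩))]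
      rw [pv_positions_getD, pv_fill_getElem _ _ _ (fun i hi => pv_positions_nonneg hi) j (by omega)]
      have : (j : Int) ∈ ((PySem.List.enumerate cs).filter (fun q => q.2 == (r, cs[j]).2)).map Prod.fst := by
        rw [pv_mem_positions hj]
      simp [this]
    · exact ih _ (by rw [pv_fill_length]; exact hlen) hnd.2 hmemt

-- per offset: B's scatter-filled buffer joins to A's decrypted string
lemma pv_offset (cs : List Char) (o : Int) (hcs : ∀ x ∈ cs, x ∈ pvEng) (ho : 0 ≤ o) :
    PySem.Chars.join []
      ((PySem.List.enumerate (pvOrderOf cs)).foldl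
        (fun out p =>
          (((PySem.List.enumerate cs).foldl
              (fun d q => d.insert q.2 (d.getD q.2 [] ++ [q.1])) PySem.Dict.empty).getD p.2 []).foldl
            (fun out i => PySem.List.pySetD out i ([PySem.List.pyGetD (pvRotate o) p.1 'A'] : List Char)) out)
        (List.replicate cs.length ([] : List Char)))
      = pvDecrypt cs (pvBuildMapping (pvOrderOf cs) o) := by
  have hbuf : ((PySem.List.enumerate (pvOrderOf cs)).foldl
      (fun out p =>
        (((PySem.List.enumerate cs).foldl
            (fun d q => d.insert q.2 (d.getD q.2 [] ++ [q.1])) PySem.Dict.empty).getD p.2 []).foldl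
          (fun out i => PySem.List.pySetD out i ([PySem.List.pyGetD (pvRotate o) p.1 'A'] : List Char)) out)
      (List.replicate cs.length ([] : List Char)))
      = (pvDecrypt cs (pvBuildMapping (pvOrderOf cs) o)).map (fun c => ([c] : List Char)) := by
    apply List.ext_getElem?
    intro j
    have hlen : ((PySem.List.enumerate (pvOrderOf cs)).foldl
        (fun out p =>
          (((PySem.List.enumerate cs).foldl
              (fun d q => d.insert q.2 (d.getD q.2 [] ++ [q.1])) PySem.Dict.empty).getD p.2 []).foldl
            (fun out i => PySem.List.pySetD out i ([PySem.List.pyGetD (pvRotate o) p.1 'A'] : List Char)) out)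
        (List.replicate cs.length ([] : List Char))).length = cs.length := by
      rw [pv_scatter_length cs (pvRotate o) (PySem.List.enumerate (pvOrderOf cs) 0)
        (List.replicate cs.length ([] : List Char))]
      exact List.length_replicate
    have hrlen : ((pvDecrypt cs (pvBuildMapping (pvOrderOf cs) o)).map (fun c => ([c] : List Char))).length
        = cs.length := by simp [pvDecrypt]
    by_cases hj : j < cs.length
    · -- the letter at j, its rank in the frequency order
      obtain ⟨rn, hrn, horder⟩ := List.getElem_of_mem (pv_mem_order.mpr (List.getElem_mem hj))
      have hmem : ((rn : Int), cs[j]) ∈ PySem.List.enumerate (pvOrderOf cs) 0 :=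
        (PySem.List.mem_enumerate_iff _ _ _).mpr ⟨rn, hrn, by simp [horder]⟩
      have hnd : ((PySem.List.enumerate (pvOrderOf cs) 0).map Prod.snd).Nodup := by
        have h := PySem.List.map_snd_enumerate (pvOrderOf cs) 0
        rw [show (Prod.snd : Int × Char → Char) = fun x => x.2 from rfl, h]
        exact pv_order_nodup cs
      rw [pv_scatter_hit cs (pvRotate o) _ _ j hj (by simp) hnd (rn : Int) hmem]
      have hrot : (pvRotate o).length = 26 := pv_rot_len ho
      have hL : (pvOrderOf cs).length ≤ 26 := pv_order_len hcs
      have hval : PySem.List.pyGetD (pvRotate o) (rn : Int) 'A' = (pvRotate o)[rn]'(by omega) := by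
        rw [PySem.List.pyGetD_natCast, List.getD_eq_getElem _ _ (by omega)]
      have hmap : (pvBuildMapping (pvOrderOf cs) o).getD (cs[j]) (cs[j]) = (pvRotate o)[rn]'(by omega) := by
        have := pv_mapping_getD hcs hrn ho
        rwa [horder] at this
      rw [hval, List.getElem?_map, List.getElem?_eq_getElem (by simp [pvDecrypt]; omega)]
      simp only [Option.map_some]
      congr 2
      simp only [pvDecrypt, List.getElem_map]
      exact hmap.symm
    · rw [List.getElem?_eq_none (by omega), List.getElem?_eq_none (by omega)]
  rw [hbuf]
  exact PySem.Chars.join_nil_singletons _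

lemma pv_main (ciphertext : String) (top_n : Int) :
    frequency_attack ciphertext top_n = frequency_attack_alt ciphertext top_n := by
  simp only [frequency_attack, frequency_attack_alt, pvCleanText]
  rw [pv_foldl_snoc, pv_foldl_snoc]
  simp only [List.nil_append]
  apply List.map_congr_left
  intro o ho
  have ho0 : 0 ≤ o := (PySem.List.mem_pyRange_one.mp ho).1
  have hcs : ∀ x ∈ List.filter PySem.Chars.isalpha (PySem.Chars.upper ciphertext.toList), x ∈ pvEng := by
    intro x hx
    exact pv_mem_clean_mem_eng (text := ciphertext) (by simpa [pvCleanText] using hx)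
  congr 1
  exact congrArg String.ofList (pv_offset _ o hcs ho0).symm

-- ===== VERDICT (by name: the statement is the Claim_ definition above) =====
theorem frequency_attack_spec : Claim_equal_frequency_attack := by
  intro ciphertext top_n _
  unfold Spec_frequency_attack
  exact pv_main ciphertext top_n
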